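-- pv_equiv track=rewrite | github.com/quodlibet/mutagen | mutagen/_vorbis.py | is_valid_key
-- ===== SOURCE A (Python) =====
-- def is_valid_key(key: str) -> bool:
--     """Return true if a string is a valid Vorbis comment key.
--
--     Valid Vorbis comment keys are printable ASCII between 0x20 (space)
--     and 0x7D ('}'), excluding '='.
--
--     Takes str/unicode in Python 2, unicode in Python 3
--     """
--
--     if isinstance(key, bytes):
--         raise TypeError("needs to be str not bytes")
--
--     for c in key:
--         if c < " " or c > "}" or c == "=":
--             return False
--     else:
--         return bool(key)
-- ===== SOURCE B (Python) =====
-- import re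
--
-- _VALID_KEY_RE = re.compile(r"[\x20-\x3c\x3e-\x7d]+")
--
-- def is_valid_key(key: str) -> bool:
--     """Return true if a string is a valid Vorbis comment key."""
--     if isinstance(key, bytes):
--         raise TypeError("needs to be str not bytes")
--     return bool(_VALID_KEY_RE.fullmatch(key))
-- ===== Notes on version B (the rewrite author's own statement) =====
-- stated objective: idiomatic
-- what changed: Replaced the explicit per-character scanning loop with early returns by a single precompiled regex fullmatch over the valid character class [\x20-\x3c\x3e-\x7d]+, whose + also encodes the non-emptiness check bool(key); the scan runs in C instead of the Python interpreter.
import Mathlib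
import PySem

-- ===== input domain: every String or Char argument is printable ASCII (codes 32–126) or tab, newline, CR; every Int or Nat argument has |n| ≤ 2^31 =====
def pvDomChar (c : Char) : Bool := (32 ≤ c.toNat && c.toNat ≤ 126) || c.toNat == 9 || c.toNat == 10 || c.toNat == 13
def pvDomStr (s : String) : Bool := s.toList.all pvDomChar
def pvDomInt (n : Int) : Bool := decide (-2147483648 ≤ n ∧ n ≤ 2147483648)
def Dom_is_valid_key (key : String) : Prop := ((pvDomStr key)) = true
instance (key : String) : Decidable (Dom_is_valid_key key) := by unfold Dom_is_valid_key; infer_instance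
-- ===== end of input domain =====

-- B replaces A's per-character loop with early returns by a single regex fullmatch over
-- the valid character class (idiomatic; same return value on every str input).

-- ===== PORT A =====
-- A's for-loop with early `return False`: `some false` models the early return,
-- `none` means the loop ran to completion (then A returns bool(key)).
def isValidKeyLoop : List Char → Option Bool
  | [] => none
  | c :: rest =>
    if c < ' ' || c > '}' || c == '=' then some false else isValidKeyLoop rest

def is_valid_key (key : String) : Bool :=
  (isValidKeyLoop key.toList).getD (!key.toList.isEmpty)

-- ===== PORT B =====
-- fullmatch of [\x20-\x3c\x3e-\x7d]+ : every char in the class, and at least one char.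
def vorbisKeyChar (c : Char) : Bool :=
  (' ' ≤ c && c ≤ '<') || ('>' ≤ c && c ≤ '}')

def is_valid_key_alt (key : String) : Bool :=
  !key.toList.isEmpty && key.toList.all vorbisKeyChar

-- ===== PRECONDITION & SPEC =====
def Spec_is_valid_key (key : String) (out : Bool) : Prop := out = is_valid_key_alt key
instance (key : String) (out : Bool) : Decidable (Spec_is_valid_key key out) := by unfold Spec_is_valid_key; infer_instance

-- ===== CLAIM (what is proved, stated in full; the proofs are below) =====
def Claim_equal_is_valid_key : Prop := ∀ (key : String), Dom_is_valid_key key → Spec_is_valid_key key (is_valid_key key)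

-- ===== LEMMAS AND PROOFS =====
-- B's character class equals the negation of A's rejection test, for every Char.
theorem vorbisKeyChar_eq (c : Char) :
    vorbisKeyChar c = !(c < ' ' || c > '}' || c == '=') := by
  have h : c.val.toNat = c.toNat := rfl
  have heq : (c == '=') = decide (c.toNat = 61) := by
    by_cases he : c = '='
    · subst he; rfl
    · have hne : c.toNat ≠ 61 :=
        fun hn => he (Char.ext (UInt32.toNat_inj.mp hn))
      simp [he, hne]
  simp only [vorbisKeyChar, Char.le_def, Char.lt_def, UInt32.le_iff_toNat_le,
    UInt32.lt_iff_toNat_lt, h, heq, Bool.not_or]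
  by_cases h1 : 32 ≤ c.toNat <;> by_cases h2 : c.toNat ≤ 60 <;>
    by_cases h3 : 62 ≤ c.toNat <;> by_cases h4 : c.toNat ≤ 125 <;>
    by_cases h5 : c.toNat = 61 <;> simp_all <;> omega

-- A's loop with default `true` computes exactly B's `all` over the character class.
theorem loop_getD_true (l : List Char) :
    (isValidKeyLoop l).getD true = l.all vorbisKeyChar := by
  induction l with
  | nil => rfl
  | cons c rest ih =>
    by_cases hv : vorbisKeyChar c = true
    · have hb : (decide (c < ' ') || decide (c > '}') || (c == '=')) = false := by
        have h := vorbisKeyChar_eq c; rw [hv] at h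
        cases hX : (decide (c < ' ') || decide (c > '}') || (c == '=')) with
        | false => rfl
        | true => rw [hX] at h; exact absurd h (by decide)
      simp [isValidKeyLoop, hb, hv, ih]
    · have hv' : vorbisKeyChar c = false := by simpa using hv
      have hb : (decide (c < ' ') || decide (c > '}') || (c == '=')) = true := by
        have h := vorbisKeyChar_eq c; rw [hv'] at h
        cases hX : (decide (c < ' ') || decide (c > '}') || (c == '=')) with
        | true => rfl
        | false => rw [hX] at h; exact absurd h (by decide)
      simp [isValidKeyLoop, hb, hv']

-- ===== VERDICT (by name: the statement is the Claim_ definition above) =====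
theorem is_valid_key_spec : Claim_equal_is_valid_key := by
  intro key _
  unfold Spec_is_valid_key is_valid_key is_valid_key_alt
  cases h : key.toList with
  | nil => simp [isValidKeyLoop]
  | cons c rest =>
    simpa using loop_getD_true (c :: rest)
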